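-- pv_equiv track=rewrite | github.com/ArrebolBlack/PAIRFormer | src/launch/build_cache_window_with_statistics_and_plot.py | _pick_three_splits
-- ===== SOURCE A (Python) =====
-- from typing import List, Dict, Any, Tuple
--
-- def _pick_three_splits(splits: List[str]) -> List[str]:
--     """
--     目标：画“一张图 3 子图”。优先 train/val/test；不足则用 splits 的前几个补齐。
--     """
--     preferred = ["train", "val", "test"]
--     picked = [s for s in preferred if s in splits]
--     if len(picked) < 3:
--         for s in splits:
--             if s not in picked:
--                 picked.append(s)
--             if len(picked) == 3:
--                 break
--     return picked[:3]
-- ===== SOURCE B (Python) =====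
-- def _pick_three_splits(splits):
--     pref = ["train", "val", "test"]
--     uniq = list(dict.fromkeys(splits))
--     rank = lambda s: pref.index(s) if s in pref else 3 + uniq.index(s)
--     return sorted(uniq, key=rank)[:3]
-- ===== Notes on version B (the rewrite author's own statement) =====
-- stated objective: alternative
-- what changed: Replaces A's filter-then-fill loop with an early break by a rank-and-sort selection: deduplicate the input once, assign each distinct split a numeric priority (0/1/2 for train/val/test, 3+first-occurrence index otherwise), stably sort by that rank and take the first three.
import Mathlib
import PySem

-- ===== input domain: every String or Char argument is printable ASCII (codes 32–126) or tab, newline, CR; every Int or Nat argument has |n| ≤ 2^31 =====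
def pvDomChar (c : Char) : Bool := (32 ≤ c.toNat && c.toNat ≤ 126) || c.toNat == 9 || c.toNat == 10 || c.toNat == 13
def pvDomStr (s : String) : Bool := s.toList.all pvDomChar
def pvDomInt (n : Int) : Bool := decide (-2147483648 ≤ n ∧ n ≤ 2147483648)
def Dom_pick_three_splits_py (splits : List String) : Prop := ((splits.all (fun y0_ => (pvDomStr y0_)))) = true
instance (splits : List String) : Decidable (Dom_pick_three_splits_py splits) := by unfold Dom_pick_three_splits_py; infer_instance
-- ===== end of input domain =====

-- B replaces A's filter-then-fill loop (early break) by a rank-and-sort selection over the deduplicated input (objective: alternative).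


-- ===== PORT A =====
-- the 'for s in splits' loop with its append / early break
def pickThreeLoopA (splits : List String) (picked : List String) : List String :=
  match splits with
  | [] => picked
  | s :: rest =>
    let picked' := if picked.contains s then picked else picked ++ [s]
    if picked'.length == 3 then picked' else pickThreeLoopA rest picked'

def pick_three_splits_py (splits : List String) : List String :=
  let preferred : List String := ["train", "val", "test"]
  let picked := preferred.filter (fun s => splits.contains s)
  let picked := if picked.length < 3 then pickThreeLoopA splits picked else picked
  picked.take 3

-- ===== PORT B =====
-- rank(s) = pref.index(s) if s in pref else 3 + uniq.index(s); '.index' is PySem.List.index?,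
-- whose 'getD 0' default is never taken on the inputs B feeds it (s ∈ pref resp. s ∈ uniq)
def pick_three_splits_py_alt (splits : List String) : List String :=
  let pref : List String := ["train", "val", "test"]
  let uniq : List String := PySem.List.dedup splits
  let rank : String → Int := fun s =>
    if pref.contains s then (((PySem.List.index? pref s).getD 0 : Nat) : Int)
    else 3 + (((PySem.List.index? uniq s).getD 0 : Nat) : Int)
  (PySem.List.sorted uniq rank false).take 3

-- ===== PRECONDITION & SPEC =====
def Spec_pick_three_splits_py (splits : List String) (out : List String) : Prop := out = pick_three_splits_py_alt splits
instance (splits : List String) (out : List String) : Decidable (Spec_pick_three_splits_py splits out) := by unfold Spec_pick_three_splits_py; infer_instance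

-- ===== CLAIM (what is proved, stated in full; the proofs are below) =====
def Claim_equal_pick_three_splits_py : Prop := ∀ (splits : List String), Dom_pick_three_splits_py splits → Spec_pick_three_splits_py splits (pick_three_splits_py splits)

-- ===== LEMMAS AND PROOFS =====

-- first-occurrence dedup by front recursion: proof-side normal form for both A's fill loop and PySem.List.dedup
def dedupFirst (xs : List String) : List String :=
  match xs with
  | [] => []
  | s :: rest => s :: dedupFirst (rest.filter (fun t => !(t == s)))
termination_by xs.length
decreasing_by
  simp only [List.length_cons, List.length_unattach]
  exact Nat.lt_succ_of_le (le_trans (List.length_filter_le _ _) (le_of_eq List.length_attach))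

theorem dedupFirst_nil : dedupFirst [] = [] := by rw [dedupFirst]
theorem dedupFirst_cons (s : String) (rest : List String) :
    dedupFirst (s :: rest) = s :: dedupFirst (rest.filter (fun t => !(t == s))) := by
  rw [dedupFirst]

theorem foldl_add_eq (l acc : List String) :
    l.foldl PySem.Set.add acc = acc ++ dedupFirst (l.filter (fun s => !acc.contains s)) := by
  induction l generalizing acc with
  | nil => simp [dedupFirst_nil]
  | cons s rest ih =>
    simp only [List.foldl_cons, List.filter_cons]
    cases hc : acc.contains s with
    | true =>
      have hm : s ∈ acc := by simpa using hc
      have : PySem.Set.add acc s = acc := by simp [PySem.Set.add, hm]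
      rw [this]
      simpa using ih acc
    | false =>
      have hm : s ∉ acc := by simpa using hc
      have ha : PySem.Set.add acc s = acc ++ [s] := by simp [PySem.Set.add, hm]
      rw [ha, ih (acc ++ [s])]
      simp only [Bool.not_false, if_true, dedupFirst_cons]
      have hfilter : (rest.filter (fun t => !acc.contains t)).filter (fun t => !(t == s))
          = rest.filter (fun t => !(acc ++ [s]).contains t) := by
        rw [List.filter_filter]
        apply List.filter_congr
        intro a _
        simp only [List.contains_append, List.contains_cons, List.contains_nil]
        cases h1 : a == s <;> cases h2 : acc.contains a <;> simp
      rw [hfilter]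
      simp

theorem dedupFirst_eq_dedup (l : List String) : dedupFirst l = PySem.List.dedup l := by
  have := foldl_add_eq l []
  simp only [List.nil_append, List.contains_nil, Bool.not_false, List.filter_true] at this
  rw [PySem.List.dedup_eq_ofList, PySem.Set.ofList_eq_foldl, this]

theorem dedupFirst_filter (p : String → Bool) (l : List String) :
    dedupFirst (l.filter p) = (dedupFirst l).filter p := by
  induction hn : l.length using Nat.strong_induction_on generalizing l p with
  | _ n ih =>
    match l with
    | [] => simp [dedupFirst_nil]
    | x :: rest =>
      rw [List.filter_cons, dedupFirst_cons, List.filter_cons]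
      cases hp : p x with
      | true =>
        simp only [if_true]
        have hlen := List.length_filter_le (fun t => !(t == x)) rest
        have hih := ih (rest.filter (fun t => !(t == x))).length
          (by simp at hn; omega) p (rest.filter (fun t => !(t == x))) rfl
        rw [dedupFirst_cons, List.filter_comm, hih]
      | false =>
        simp only [Bool.false_eq_true, if_false]
        have hcong : rest.filter p = (rest.filter (fun t => !(t == x))).filter p := by
          rw [List.filter_filter]
          apply List.filter_congr
          intro a _
          cases h1 : a == x with
          | true => have : a = x := by simpa using h1
                    simp [this, hp]
          | false => simp
        have hlen := List.length_filter_le (fun t => !(t == x)) rest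
        have hih := ih (rest.filter (fun t => !(t == x))).length
          (by simp at hn; omega) p (rest.filter (fun t => !(t == x))) rfl
        rw [hcong, hih]

theorem index?_getElem_of_nodup (l : List String) (h : l.Nodup) :
    ∀ (k : Nat) (hk : k < l.length), PySem.List.index? l l[k] = some k := by
  induction l with
  | nil => intro k hk; simp at hk
  | cons x t ih =>
    intro k hk
    match k with
    | 0 => simpa using PySem.List.index?_cons_self x t
    | Nat.succ m =>
      have hm : m < t.length := by simpa using hk
      have hne : x ≠ t[m] := by
        intro he
        exact (List.nodup_cons.mp h).1 (he ▸ List.getElem_mem hm)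
      have : (x :: t)[m + 1] = t[m] := by simp
      rw [this, PySem.List.index?_cons_of_ne _ hne, ih (List.nodup_cons.mp h).2 m hm]
      rfl

theorem pairwise_idx_of_nodup (l : List String) (h : l.Nodup) :
    l.Pairwise (fun a b => ((PySem.List.index? l a).getD 0 : Nat) < ((PySem.List.index? l b).getD 0 : Nat)) := by
  rw [List.pairwise_iff_getElem]
  intro i j hi hj hij
  rw [index?_getElem_of_nodup l h i hi, index?_getElem_of_nodup l h j hj]
  simpa using hij

theorem loopA_eq (splits picked : List String) (h : picked.length < 3) :
    pickThreeLoopA splits picked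
      = (picked ++ dedupFirst (splits.filter (fun s => !picked.contains s))).take 3 := by
  induction splits generalizing picked with
  | nil =>
    simp [pickThreeLoopA, dedupFirst_nil, List.take_of_length_le (Nat.le_of_lt h)]
  | cons s rest ih =>
    simp only [pickThreeLoopA, List.filter_cons]
    cases hc : picked.contains s with
    | true =>
      have hlen : (picked.length == 3) = false := by simp [Nat.ne_of_lt h]
      simp only [Bool.not_true, Bool.false_eq_true, if_false, if_true, hlen]
      exact ih picked h
    | false =>
      simp only [Bool.not_false, Bool.false_eq_true, if_false, if_true]
      rw [dedupFirst_cons]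
      have hfilter : (rest.filter (fun t => !picked.contains t)).filter (fun t => !(t == s))
          = rest.filter (fun t => !(picked ++ [s]).contains t) := by
        rw [List.filter_filter]
        apply List.filter_congr
        intro a _
        simp only [List.contains_append, List.contains_cons, List.contains_nil]
        cases h1 : a == s <;> cases h2 : picked.contains a <;> simp
      rw [hfilter]
      by_cases h3 : (picked ++ [s]).length = 3
      · have hb : ((picked ++ [s]).length == 3) = true := by simp [h3]
        rw [hb]
        simp only [if_true]
        have hsplit : picked ++ s :: dedupFirst (rest.filter (fun t => !(picked ++ [s]).contains t))
            = (picked ++ [s]) ++ dedupFirst (rest.filter (fun t => !(picked ++ [s]).contains t)) := by simp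
        rw [hsplit, List.take_append_of_le_length (Nat.le_of_eq h3.symm),
            List.take_of_length_le (Nat.le_of_eq h3)]
      · have hlt : (picked ++ [s]).length < 3 := by
          simp only [List.length_append, List.length_cons, List.length_nil] at h3 ⊢
          omega
        have hb : ((picked ++ [s]).length == 3) = false := by
          simp only [beq_eq_false_iff_ne]
          exact h3
        rw [hb]
        simp only [Bool.false_eq_true, if_false]
        have hsplit : picked ++ s :: dedupFirst (rest.filter (fun t => !(picked ++ [s]).contains t))
            = (picked ++ [s]) ++ dedupFirst (rest.filter (fun t => !(picked ++ [s]).contains t)) := by simp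
        rw [ih _ hlt, hsplit]

theorem picked0_nodup (splits : List String) :
    (List.filter (fun s => splits.contains s) ["train", "val", "test"]).Nodup :=
  List.Nodup.filter _ (by decide)

-- ===== VERDICT (by name: the statement is the Claim_ definition above) =====
theorem pick_three_splits_py_spec : Claim_equal_pick_three_splits_py := by
  unfold Claim_equal_pick_three_splits_py
  intro splits _
  unfold Spec_pick_three_splits_py pick_three_splits_py pick_three_splits_py_alt
  simp only []
  set pref : List String := ["train", "val", "test"] with hpref
  set picked0 := List.filter (fun s => splits.contains s) pref with hp0
  set uniq := PySem.List.dedup splits with huniq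
  set rank : String → Int := (fun s =>
    if pref.contains s then (((PySem.List.index? pref s).getD 0 : Nat) : Int)
    else 3 + (((PySem.List.index? uniq s).getD 0 : Nat) : Int)) with hrank
  -- facts about rank on the three preferred strings
  have hrt : rank "train" = 0 := by
    rw [hrank]; simp only [hpref]; split
    · decide
    · next h => exact absurd (by decide : List.contains ["train", "val", "test"] "train" = true) h
  have hrv : rank "val" = 1 := by
    rw [hrank]; simp only [hpref]; split
    · decide
    · next h => exact absurd (by decide : List.contains ["train", "val", "test"] "val" = true) h
  have hrte : rank "test" = 2 := by
    rw [hrank]; simp only [hpref]; split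
    · decide
    · next h => exact absurd (by decide : List.contains ["train", "val", "test"] "test" = true) h
  have hrnp : ∀ b : String, pref.contains b = false →
      rank b = 3 + (((PySem.List.index? uniq b).getD 0 : Nat) : Int) := by
    intro b hb; simp only [hrank]; rw [if_neg (by simpa using hb)]
  have hnuniq : uniq.Nodup := by rw [huniq]; exact PySem.List.nodup_dedup splits
  -- the sorted order, named: preferred-and-present first, then the other distinct splits in first-occurrence order
  have hsorted : PySem.List.sorted uniq rank false
      = picked0 ++ uniq.filter (fun s => !pref.contains s) := by
    apply PySem.List.sorted_eq_of_perm_of_pairwise_lt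
    · -- permutation
      have h1 : picked0.Perm (uniq.filter (fun s => pref.contains s)) := by
        apply List.perm_of_nodup_nodup_toFinset_eq (picked0_nodup splits)
          (hnuniq.filter _)
        ext a
        simp only [List.mem_toFinset, List.mem_filter, huniq, PySem.List.mem_dedup]
        constructor
        · rintro ⟨h1, h2⟩
          exact ⟨by simpa using h2, by simpa [hpref] using h1⟩
        · rintro ⟨h1, h2⟩
          exact ⟨by simpa [hpref] using h2, by simpa using h1⟩
      exact (h1.append_right _).trans (List.filter_append_perm _ uniq)
    · -- strictly increasing rank along that order
      rw [List.pairwise_append]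
      refine ⟨?_, ?_, ?_⟩
      · -- within the preferred prefix
        have hpp : List.Pairwise (fun a b => rank a < rank b) pref := by
          rw [hpref]
          refine List.Pairwise.cons ?_ (List.Pairwise.cons ?_ (List.pairwise_singleton _ _))
          · intro b hb
            rcases (by simpa using hb : b = "val" ∨ b = "test") with rfl | rfl
            · rw [hrt, hrv]; norm_num
            · rw [hrt, hrte]; norm_num
          · intro b hb
            rcases (by simpa using hb : b = "test") with rfl
            rw [hrv, hrte]; norm_num
        exact List.Pairwise.sublist List.filter_sublist hpp
      · -- within the non-preferred suffix: first-occurrence indices increase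
        have hpwf := List.Pairwise.sublist
          (List.filter_sublist (p := fun s => !pref.contains s) (l := uniq))
          (pairwise_idx_of_nodup uniq hnuniq)
        apply List.Pairwise.imp_of_mem ?_ hpwf
        intro a b ha hb hab
        have haf : pref.contains a = false := by
          simpa using (List.mem_filter.mp ha).2
        have hbf : pref.contains b = false := by
          simpa using (List.mem_filter.mp hb).2
        rw [hrnp a haf, hrnp b hbf]
        omega
      · -- every preferred-and-present split ranks below every non-preferred one
        intro a ha b hb
        have hap : a ∈ pref := (by simpa [hp0] using ha : a ∈ pref ∧ a ∈ splits).1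
        have hbf : pref.contains b = false := by
          simpa using (List.mem_filter.mp hb).2
        have hb3 : 3 ≤ rank b := by
          rw [hrnp b hbf]
          have := Int.natCast_nonneg ((PySem.List.index? uniq b).getD 0)
          omega
        have ha2 : rank a ≤ 2 := by
          rcases (by simpa [hpref] using hap : a = "train" ∨ a = "val" ∨ a = "test") with rfl | rfl | rfl
          all_goals simp [hrt, hrv, hrte]
        omega
  -- A's fill loop produces the same list
  have hfc : splits.filter (fun s => !picked0.contains s) = splits.filter (fun s => !pref.contains s) := by
    apply List.filter_congr
    intro a ha
    congr 1
    by_cases hc : a ∈ pref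
    · have hm : a ∈ picked0 := by
        rw [hp0]; exact List.mem_filter.mpr ⟨hc, by simpa using ha⟩
      simp [hm, hc]
    · have hm : a ∉ picked0 := fun hm => hc (by simpa [hp0] using hm : a ∈ pref ∧ a ∈ splits).1
      simp [hm, hc]
  have hmid : dedupFirst (splits.filter (fun s => !picked0.contains s))
      = uniq.filter (fun s => !pref.contains s) := by
    rw [hfc, dedupFirst_filter, dedupFirst_eq_dedup, ← huniq]
  rw [hsorted]
  by_cases hl : picked0.length < 3
  · rw [if_pos hl, loopA_eq splits picked0 hl, List.take_take, Nat.min_self, hmid]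
  · rw [if_neg hl]
    have h3 : picked0.length = 3 := by
      have hle : picked0.length ≤ 3 := by
        rw [hp0]; simpa using List.length_filter_le (fun s => splits.contains s) pref
      omega
    rw [List.take_append_of_le_length (Nat.le_of_eq h3.symm)]
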